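-- pv_equiv track=rewrite | github.com/abhinav30/Disguised-Face-Recognition | programs/test_images.py | get_image_patch_list
-- ===== SOURCE A (Python) =====
-- def get_image_patch_list(file_list):
--     image_dict = {}
--     for file_name in file_list:
--         subject_no = file_name[:file_name.find('_')]
--         image_no = file_name[file_name.find('_')+1:file_name.rfind('_')]
--         if subject_no in image_dict:
--             if image_no not in image_dict[subject_no]:
--                 image_dict[subject_no].append(image_no)
--         else:
--             image_dict[subject_no] = []
--             image_dict[subject_no].append(image_no)
--     return image_dict
-- ===== SOURCE B (Python) =====
-- def get_image_patch_list(file_list):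
--     # collect-then-dedup: append every image number, deduplicate in a second pass
--     groups = {}
--     for file_name in file_list:
--         i = file_name.find('_')
--         j = file_name.rfind('_')
--         groups.setdefault(file_name[:i], []).append(file_name[i + 1:j])
--     return {subject: list(dict.fromkeys(nums)) for subject, nums in groups.items()}
-- ===== Notes on version B (the rewrite author's own statement) =====
-- stated objective: alternative
-- what changed: A interleaves per-item membership tests inside one pass; B collects all image numbers per subject unconditionally (setdefault/append) and deduplicates each list in a separate second pass with dict.fromkeys.
import Mathlib
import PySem

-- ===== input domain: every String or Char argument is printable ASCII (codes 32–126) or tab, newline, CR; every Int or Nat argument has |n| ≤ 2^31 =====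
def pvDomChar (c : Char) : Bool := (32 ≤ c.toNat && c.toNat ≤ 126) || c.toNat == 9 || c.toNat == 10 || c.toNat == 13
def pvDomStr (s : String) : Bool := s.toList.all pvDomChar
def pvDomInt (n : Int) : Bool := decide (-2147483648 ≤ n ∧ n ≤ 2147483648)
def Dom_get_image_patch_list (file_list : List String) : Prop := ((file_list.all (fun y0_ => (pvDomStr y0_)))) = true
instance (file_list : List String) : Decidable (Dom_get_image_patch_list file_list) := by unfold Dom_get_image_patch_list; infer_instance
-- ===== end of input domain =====

-- B replaces A's interleaved membership-test loop by collect-all-then-dedup (setdefault/append, then dict.fromkeys per list); same cost, different decomposition.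

-- ===== PORT A =====
def get_image_patch_list (file_list : List String) : List (String × List String) :=
  (file_list.foldl (fun image_dict file_name =>
      let subject_no := PySem.Str.slice file_name none (some (PySem.Str.find file_name "_"))
      let image_no := PySem.Str.slice file_name (some (PySem.Str.find file_name "_" + 1))
                        (some (PySem.Str.rfind file_name "_"))
      if image_dict.contains subject_no then
        if (image_dict.getD subject_no []).contains image_no then image_dict
        else image_dict.insert subject_no (image_dict.getD subject_no [] ++ [image_no])
      else image_dict.insert subject_no [image_no])
    (PySem.Dict.empty : PySem.Dict String (List String))).items

-- ===== PORT B =====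
def get_image_patch_list_alt (file_list : List String) : List (String × List String) :=
  let groups := file_list.foldl (fun d file_name =>
      let i := PySem.Str.find file_name "_"
      let j := PySem.Str.rfind file_name "_"
      d.modify (PySem.Str.slice file_name none (some i)) []
        (fun nums => nums ++ [PySem.Str.slice file_name (some (i + 1)) (some j)]))
    (PySem.Dict.empty : PySem.Dict String (List String))
  groups.items.map (fun p => (p.1, PySem.List.dedup p.2))

-- ===== PRECONDITION & SPEC =====
def Spec_get_image_patch_list (file_list : List String) (out : List (String × List String)) : Prop := out = get_image_patch_list_alt file_list
instance (file_list : List String) (out : List (String × List String)) : Decidable (Spec_get_image_patch_list file_list out) := by unfold Spec_get_image_patch_list; infer_instance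

-- ===== CLAIM (what is proved, stated in full; the proofs are below) =====
def Claim_equal_get_image_patch_list : Prop := ∀ (file_list : List String), Dom_get_image_patch_list file_list → Spec_get_image_patch_list file_list (get_image_patch_list file_list)

-- ===== LEMMAS AND PROOFS =====

/-- subject key parsed from a file name (shared characterisation helper). -/
def pvKey (fn : String) : String :=
  PySem.Str.slice fn none (some (PySem.Str.find fn "_"))

/-- image number parsed from a file name. -/
def pvVal (fn : String) : String :=
  PySem.Str.slice fn (some (PySem.Str.find fn "_" + 1)) (some (PySem.Str.rfind fn "_"))

/-- A's loop body, on an already-parsed (subject, image) pair. -/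
def pvStepA (d : PySem.Dict String (List String)) (p : String × String) :
    PySem.Dict String (List String) :=
  if d.contains p.1 then
    if (d.getD p.1 []).contains p.2 then d
    else d.insert p.1 (d.getD p.1 [] ++ [p.2])
  else d.insert p.1 [p.2]

theorem pvFoldA_eq (file_list : List String) :
    (file_list.foldl (fun image_dict file_name =>
      let subject_no := PySem.Str.slice file_name none (some (PySem.Str.find file_name "_"))
      let image_no := PySem.Str.slice file_name (some (PySem.Str.find file_name "_" + 1))
                        (some (PySem.Str.rfind file_name "_"))
      if image_dict.contains subject_no then
        if (image_dict.getD subject_no []).contains image_no then image_dict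
        else image_dict.insert subject_no (image_dict.getD subject_no [] ++ [image_no])
      else image_dict.insert subject_no [image_no])
    (PySem.Dict.empty : PySem.Dict String (List String)))
    = (file_list.map (fun fn => (pvKey fn, pvVal fn))).foldl pvStepA PySem.Dict.empty := by
  rw [List.foldl_map]; rfl

theorem pvFoldB_eq (file_list : List String) :
    (file_list.foldl (fun d file_name =>
      let i := PySem.Str.find file_name "_"
      let j := PySem.Str.rfind file_name "_"
      d.modify (PySem.Str.slice file_name none (some i)) []
        (fun nums => nums ++ [PySem.Str.slice file_name (some (i + 1)) (some j)]))
    (PySem.Dict.empty : PySem.Dict String (List String)))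
    = (file_list.map (fun fn => (pvKey fn, pvVal fn))).foldl
        (fun d p => d.modify p.1 [] (fun nums => nums ++ [p.2])) PySem.Dict.empty := by
  rw [List.foldl_map]; rfl

theorem pvStepA_getD (d : PySem.Dict String (List String)) (p : String × String) (c : String) :
    (pvStepA d p).getD c [] =
      if p.1 = c then PySem.Set.add (d.getD c []) p.2 else d.getD c [] := by
  unfold pvStepA
  by_cases hk : p.1 = c
  · subst hk
    by_cases hc : d.contains p.1
    · simp only [hc, if_true]
      by_cases hmem : p.2 ∈ d.getD p.1 []
      · simp [hmem]
      · simp [hmem, PySem.Set.add_of_not_mem hmem]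
    · have h0 : d.getD p.1 [] = ([] : List String) :=
        PySem.Dict.getD_of_not_contains d [] (by simpa using hc)
      simp [hc, h0, PySem.Set.add]
  · by_cases hc : d.contains p.1 <;>
      by_cases hmem : p.2 ∈ d.getD p.1 [] <;>
      simp [hc, hmem, hk, PySem.Dict.getD_insert, Ne.symm hk]

theorem pvStepA_keys (d : PySem.Dict String (List String)) (p : String × String) :
    (pvStepA d p).keys = PySem.Set.add d.keys p.1 := by
  unfold pvStepA
  by_cases hc : d.contains p.1
  · have hmem : p.1 ∈ d.keys := (PySem.Dict.contains_iff_mem_keys d p.1).mp hc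
    simp only [hc, if_true]
    split <;>
      simp [PySem.Set.add_of_mem hmem, PySem.Dict.keys_insert_of_contains _ _ hc]
  · have hmem : p.1 ∉ d.keys := fun h => hc ((PySem.Dict.contains_iff_mem_keys d p.1).mpr h)
    simp [hc, PySem.Set.add_of_not_mem hmem,
      PySem.Dict.keys_insert_of_not_contains _ _ (by simpa using hc)]

theorem pvFoldA_getD (P : List (String × String)) (d : PySem.Dict String (List String))
    (c : String) :
    (P.foldl pvStepA d).getD c [] =
      PySem.Set.update (d.getD c []) ((P.filter (fun p => p.1 == c)).map (·.2)) := by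
  induction P generalizing d with
  | nil => simp [PySem.Set.update]
  | cons p rest ih =>
    simp only [List.foldl_cons, ih, List.filter_cons]
    by_cases hk : p.1 = c
    · simp [hk, pvStepA_getD, PySem.Set.update_cons]
    · simp [hk, pvStepA_getD, (by simpa using hk : (p.1 == c) = false)]

theorem pvFoldA_keys (P : List (String × String)) (d : PySem.Dict String (List String)) :
    (P.foldl pvStepA d).keys = PySem.Set.update d.keys (P.map (·.1)) := by
  induction P generalizing d with
  | nil => simp [PySem.Set.update]
  | cons p rest ih =>
    simp [List.foldl_cons, ih, pvStepA_keys, PySem.Set.update_cons]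

theorem get_image_patch_list_spec' (file_list : List String) :
    get_image_patch_list file_list = get_image_patch_list_alt file_list := by
  unfold get_image_patch_list get_image_patch_list_alt
  rw [pvFoldA_eq, pvFoldB_eq]
  set P := file_list.map (fun fn => (pvKey fn, pvVal fn)) with hP
  set dA := P.foldl pvStepA PySem.Dict.empty with hdA
  set dB := P.foldl (fun d p => d.modify p.1 [] (fun nums => nums ++ [p.2]))
      PySem.Dict.empty with hdB
  -- keys coincide and are nodup
  have hkA : dA.keys = PySem.Set.ofList (P.map (·.1)) := by
    rw [hdA, pvFoldA_keys]
    simp [PySem.Dict.keys_empty, PySem.Set.update_nil_left]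
  have hkB : dB.keys = PySem.Set.ofList (P.map (·.1)) := by
    rw [hdB, PySem.Dict.keys_foldl_modify_key (key := fun p : String × String => p.1)]
    simp [PySem.Dict.keys_empty, PySem.Set.update_nil_left]
  have hgB : ∀ c, dB.getD c [] = (P.filter (fun p => p.1 == c)).map (·.2) := by
    intro c
    rw [hdB, PySem.Dict.getD_foldl_modify_append]
    simp [PySem.Dict.getD_empty]
  have hgA : ∀ c, dA.getD c [] =
      PySem.List.dedup ((P.filter (fun p => p.1 == c)).map (·.2)) := by
    intro c
    rw [hdA, pvFoldA_getD]
    simp [PySem.Dict.getD_empty, PySem.Set.update_nil_left]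
  have hndA : dA.keys.Nodup := by rw [hkA]; exact PySem.Set.nodup_ofList _
  have hndB : dB.keys.Nodup := by rw [hkB]; exact PySem.Set.nodup_ofList _
  show dA.items = dB.items.map (fun p => (p.1, PySem.List.dedup p.2))
  rw [PySem.Dict.items_eq_map_keys dA hndA [], PySem.Dict.items_eq_map_keys dB hndB [],
    hkA, hkB]
  conv_rhs => rw [List.map_map]
  exact List.map_congr_left fun k _ => by simp [Function.comp, hgA k, hgB k]

-- ===== VERDICT (by name: the statement is the Claim_ definition above) =====
theorem get_image_patch_list_spec : Claim_equal_get_image_patch_list := by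
  intro file_list _
  unfold Spec_get_image_patch_list
  exact get_image_patch_list_spec' file_list
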